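-- pv_equiv track=rewrite | github.com/gbcolborne/ner_eval | eval/eval_utils.py | get_bilou_mention_offsets
-- ===== SOURCE A (Python) =====
-- def get_bilou_mention_offsets(labels):
--     """ Given a list of BILOU labels, find mention boundaries, return
--     start offsets and end offsets of the mentions. """
--     offsets = []
--     prefixes = [x[0] for x in labels]
--     # Pad labels with an extra O at the end to avoid going out of
--     # bounds when we look for the end offset of the mentons we find
--     prefixes.append("O")
--     i = 0
--     while i < len(labels):
--         prefix = prefixes[i]
--         if prefix == "U":
--             offsets.append((i,i))
--             i += 1
--         elif prefix == "B":
--             end = i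
--             while prefixes[end+1] == "I":
--                 end += 1
--             # Next should be L
--             end += 1
--             if prefixes[end] != "L":
--                 msg = "Error: expected L at index {}".format(end)
--                 msg += " in {}".format(prefixes)
--                 raise ValueError(msg)
--             offsets.append((i, end))
--             i = end + 1
--         else:
--             i += 1
--     return offsets
-- ===== SOURCE B (Python) =====
-- def get_bilou_mention_offsets(labels):
--     """ Given a list of BILOU labels, find mention boundaries, return
--     start offsets and end offsets of the mentions. """
--     prefixes = [x[0] for x in labels]
--     prefixes.append("O")
--     offsets = []
--     start = None
--     for i in range(len(labels)):
--         p = prefixes[i]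
--         if start is None:
--             if p == "U":
--                 offsets.append((i, i))
--             elif p == "B":
--                 start = i
--         else:
--             if p == "I":
--                 continue
--             elif p == "L":
--                 offsets.append((start, i))
--                 start = None
--             else:
--                 msg = "Error: expected L at index {}".format(i)
--                 msg += " in {}".format(prefixes)
--                 raise ValueError(msg)
--     if start is not None:
--         msg = "Error: expected L at index {}".format(len(labels))
--         msg += " in {}".format(prefixes)
--         raise ValueError(msg)
--     return offsets
-- ===== Notes on version B (the rewrite author's own statement) =====
-- stated objective: simpler
-- what changed: Replaced A's nested scan (outer index loop with an inner while-loop that looks ahead for the I-run and then jumps the outer index past the mention) by a flat single-pass state machine keeping one Optional start variable, with no look-ahead and no index jumping; error messages are reconstructed identically.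
import Mathlib
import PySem

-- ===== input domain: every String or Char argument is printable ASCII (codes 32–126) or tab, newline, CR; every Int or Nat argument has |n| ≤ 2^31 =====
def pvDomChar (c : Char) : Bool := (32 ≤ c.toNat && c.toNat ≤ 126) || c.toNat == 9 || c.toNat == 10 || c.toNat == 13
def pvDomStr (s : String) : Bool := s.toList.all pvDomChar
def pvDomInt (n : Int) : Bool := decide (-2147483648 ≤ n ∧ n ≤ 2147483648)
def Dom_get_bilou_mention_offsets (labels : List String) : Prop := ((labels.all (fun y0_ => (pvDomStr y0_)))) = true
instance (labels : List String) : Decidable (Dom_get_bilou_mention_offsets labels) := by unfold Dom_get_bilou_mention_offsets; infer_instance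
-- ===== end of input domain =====

-- B replaces A's outer-loop-with-inner-lookahead-and-jump by a flat one-pass state machine
-- (one Optional start variable, no look-ahead); same return value wherever A returns.

-- ===== PORT A =====
-- x[0] of a label; Python raises IndexError on "" (excluded by Pre_), here default '?'.
def pvFirst (s : String) : Char := (PySem.Str.pyGet? s 0).getD '?'

-- prefixes = [x[0] for x in labels]; prefixes.append("O")
def pvPrefixes (labels : List String) : List Char := (labels.map pvFirst) ++ ['O']

-- inner 'while prefixes[end+1] == "I": end += 1' (fuel-bounded; fuel = len(prefixes) suffices)
def pvScanEnd (p : List Char) : Nat → Nat → Nat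
  | 0, e => e
  | f + 1, e => if p.getD (e + 1) '?' = 'I' then pvScanEnd p f (e + 1) else e

-- outer 'while i < len(labels)' with the jump 'i = end + 1'; the raise path returns the
-- offsets so far (Pre_ excludes it).
def pvLoopA (p : List Char) (n : Nat) : Nat → Nat → List (Int × Int) → List (Int × Int)
  | 0, _, offsets => offsets
  | f + 1, i, offsets =>
    if i < n then
      let pfx := p.getD i '?'
      if pfx = 'U' then pvLoopA p n f (i + 1) (offsets ++ [((i : Int), (i : Int))])
      else if pfx = 'B' then
        let e := pvScanEnd p p.length i + 1
        if p.getD e '?' ≠ 'L' then offsets   -- raise ValueError (outside Pre_)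
        else pvLoopA p n f (e + 1) (offsets ++ [((i : Int), (e : Int))])
      else pvLoopA p n f (i + 1) offsets
    else offsets

def get_bilou_mention_offsets (labels : List String) : List (Int × Int) :=
  pvLoopA (pvPrefixes labels) labels.length labels.length 0 []

-- ===== PORT B =====
-- flat state machine: 'for i in range(len(labels))' as a walk over the unpadded prefixes
-- with counter i and state start : Option Nat; raise paths (outside Pre_) return offsets so far.
def pvLoopB : List Char → Nat → Option Nat → List (Int × Int) → List (Int × Int)
  | [], _, start, offsets =>
    match start with
    | some _ => offsets     -- raise ValueError (unterminated mention; outside Pre_)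
    | none => offsets
  | c :: rest, i, start, offsets =>
    match start with
    | none =>
      if c = 'U' then pvLoopB rest (i + 1) none (offsets ++ [((i : Int), (i : Int))])
      else if c = 'B' then pvLoopB rest (i + 1) (some i) offsets
      else pvLoopB rest (i + 1) none offsets
    | some s =>
      if c = 'I' then pvLoopB rest (i + 1) (some s) offsets
      else if c = 'L' then pvLoopB rest (i + 1) none (offsets ++ [((s : Int), (i : Int))])
      else offsets          -- raise ValueError (outside Pre_)

def get_bilou_mention_offsets_alt (labels : List String) : List (Int × Int) :=
  pvLoopB (labels.map pvFirst) 0 none []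

-- ===== PRECONDITION & SPEC =====
-- Pre_ is exactly where the Python A returns: it excludes labels containing the empty string
-- (A's 'x[0]' raises IndexError) and label sequences where some 'B' prefix is not followed by
-- zero or more 'I' prefixes and then an 'L' (A raises ValueError there).
def Pre_get_bilou_mention_offsets (labels : List String) : Prop :=
  (∀ s ∈ labels, s ≠ "") ∧
  (∀ i, i < labels.length →
    (labels.map (fun s => s.toList.headD '?')).getD i '?' = 'B' →
    ∃ j, j < labels.length ∧ i < j ∧
      (labels.map (fun s => s.toList.headD '?')).getD j '?' = 'L' ∧
      ∀ k, k < j → i < k → (labels.map (fun s => s.toList.headD '?')).getD k '?' = 'I')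
instance (labels : List String) : Decidable (Pre_get_bilou_mention_offsets labels) := by
  unfold Pre_get_bilou_mention_offsets; infer_instance

def pvWitness_get_bilou_mention_offsets : List String := ["B-x", "I-x", "L-x", "O", "U-y"]

def Spec_get_bilou_mention_offsets (labels : List String) (out : List (Int × Int)) : Prop := out = get_bilou_mention_offsets_alt labels
instance (labels : List String) (out : List (Int × Int)) : Decidable (Spec_get_bilou_mention_offsets labels out) := by unfold Spec_get_bilou_mention_offsets; infer_instance

-- ===== CLAIM (what is proved, stated in full; the proofs are below) =====
def Claim_equal_get_bilou_mention_offsets : Prop := ∀ (labels : List String), Dom_get_bilou_mention_offsets labels → Pre_get_bilou_mention_offsets labels → Spec_get_bilou_mention_offsets labels (get_bilou_mention_offsets labels)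

-- ===== LEMMAS AND PROOFS =====

theorem pvFirst_eq_headD (s : String) : pvFirst s = s.toList.headD '?' := by
  have h : PySem.Str.pyGet? s 0 = s.toList[0]? := by
    simp [PySem.List.pyGet?_zero]
  rw [pvFirst, h]
  generalize s.toList = l
  cases l <;> rfl

theorem drop_eq_getD_cons (cs : List Char) (j : Nat) (h : j < cs.length) :
    cs.drop j = cs.getD j '?' :: cs.drop (j + 1) := by
  rw [List.getD_eq_getElem cs '?' h]
  exact List.drop_eq_getElem_cons h

theorem pvScanEnd_eq (p : List Char) (j : Nat) (hj : p.getD j '?' ≠ 'I') :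
    ∀ fuel i, i < j → (∀ k, k < j → i < k → p.getD k '?' = 'I') → j - 1 - i ≤ fuel →
    pvScanEnd p fuel i = j - 1 := by
  intro fuel
  induction fuel with
  | zero =>
    intro i hij _ hfuel
    show i = j - 1
    omega
  | succ f ih =>
    intro i hij hI hfuel
    show (if p.getD (i + 1) '?' = 'I' then pvScanEnd p f (i + 1) else i) = j - 1
    by_cases h : i + 1 = j
    · have hne : p.getD (i + 1) '?' ≠ 'I' := by rw [h]; exact hj
      rw [if_neg hne]; omega
    · have hIi : p.getD (i + 1) '?' = 'I' := hI (i + 1) (by omega) (by omega)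
      rw [if_pos hIi]
      exact ih (i + 1) (by omega) (fun k h1 h2 => hI k h1 (by omega)) (by omega)

theorem pvLoopB_run (cs : List Char) (s : Nat) :
    ∀ d j e acc, j ≤ e → e - j = d → e < cs.length →
    (∀ k, k < e → j ≤ k → cs.getD k '?' = 'I') → cs.getD e '?' = 'L' →
    pvLoopB (cs.drop j) j (some s) acc
      = pvLoopB (cs.drop (e + 1)) (e + 1) none (acc ++ [((s : Int), (e : Int))]) := by
  intro d
  induction d with
  | zero =>
    intro j e acc hje hd he _ hL
    have hje2 : j = e := by omega
    subst hje2
    rw [drop_eq_getD_cons cs j he, hL]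
    simp [pvLoopB]
  | succ d ih =>
    intro j e acc hje hd he hI hL
    have hjlt : j < cs.length := by omega
    have hIj : cs.getD j '?' = 'I' := hI j (by omega) le_rfl
    rw [drop_eq_getD_cons cs j hjlt, hIj]
    have hstep : pvLoopB ('I' :: cs.drop (j + 1)) j (some s) acc
        = pvLoopB (cs.drop (j + 1)) (j + 1) (some s) acc := by simp [pvLoopB]
    rw [hstep]
    exact ih (j + 1) e acc (by omega) (by omega) he (fun k h1 h2 => hI k h1 (by omega)) hL

-- the padded list agrees with the unpadded one below n
theorem pad_getD_lt (cs : List Char) (i : Nat) (h : i < cs.length) :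
    (cs ++ ['O']).getD i '?' = cs.getD i '?' := by
  simp [List.getD_eq_getElem?_getD, List.getElem?_append_left h]

theorem pvLoopA_eq_pvLoopB (cs : List Char)
    (hpre : ∀ i, i < cs.length → cs.getD i '?' = 'B' →
      ∃ j, j < cs.length ∧ i < j ∧ cs.getD j '?' = 'L' ∧
        ∀ k, k < j → i < k → cs.getD k '?' = 'I') :
    ∀ fuel i acc, cs.length - i ≤ fuel →
    pvLoopA (cs ++ ['O']) cs.length fuel i acc = pvLoopB (cs.drop i) i none acc := by
  intro fuel
  induction fuel with
  | zero =>
    intro i acc hfuel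
    have hnil : cs.drop i = [] := List.drop_eq_nil_of_le (by omega)
    simp [pvLoopA, hnil, pvLoopB]
  | succ f ih =>
    intro i acc hfuel
    by_cases hi : i < cs.length
    · have hd := drop_eq_getD_cons cs i hi
      have hpi : (cs ++ ['O']).getD i '?' = cs.getD i '?' := pad_getD_lt cs i hi
      by_cases hU : cs.getD i '?' = 'U'
      · show (if i < cs.length then _ else _) = _
        rw [if_pos hi]
        simp only [hpi, hU, if_pos rfl]
        rw [ih (i + 1) _ (by omega), hd, hU]
        simp [pvLoopB]
      · by_cases hB : cs.getD i '?' = 'B'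
        · obtain ⟨j, hjn, hij, hL, hI⟩ := hpre i hi hB
          have hpI : ∀ k, k < j → i < k → (cs ++ ['O']).getD k '?' = 'I' := by
            intro k h1 h2; rw [pad_getD_lt cs k (by omega)]; exact hI k h1 h2
          have hpj : (cs ++ ['O']).getD j '?' = 'L' := by
            rw [pad_getD_lt cs j hjn]; exact hL
          have hscan : pvScanEnd (cs ++ ['O']) (cs ++ ['O']).length i = j - 1 :=
            pvScanEnd_eq (cs ++ ['O']) j (by rw [hpj]; decide) _ i hij hpI (by simp; omega)
          show (if i < cs.length then _ else _) = _
          rw [if_pos hi]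
          simp only [hpi, hB, if_neg (by decide : ¬('B' = 'U')), if_pos rfl, hscan]
          have hj1 : j - 1 + 1 = j := by omega
          rw [hj1, hpj]
          rw [if_neg (by simp : ¬('L' ≠ 'L'))]
          rw [ih (j + 1) _ (by omega), hd, hB]
          have hstep : pvLoopB ('B' :: cs.drop (i + 1)) i none acc
              = pvLoopB (cs.drop (i + 1)) (i + 1) (some i) acc := by simp [pvLoopB]
          rw [hstep]
          exact (pvLoopB_run cs i (j - (i + 1)) (i + 1) j acc (by omega) rfl hjn
            (fun k h1 h2 => hI k h1 (by omega)) hL).symm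
        · show (if i < cs.length then _ else _) = _
          rw [if_pos hi]
          simp only [hpi, if_neg hU, if_neg hB]
          rw [ih (i + 1) _ (by omega), hd]
          have hstep : pvLoopB (cs.getD i '?' :: cs.drop (i + 1)) i none acc
              = pvLoopB (cs.drop (i + 1)) (i + 1) none acc := by
            simp only [pvLoopB]
            rw [if_neg hU, if_neg hB]
          rw [hstep]
    · have hnil : cs.drop i = [] := List.drop_eq_nil_of_le (by omega)
      show (if i < cs.length then _ else _) = _
      rw [if_neg hi, hnil]
      simp [pvLoopB]

theorem map_pvFirst_eq (labels : List String) :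
    labels.map pvFirst = labels.map (fun s => s.toList.headD '?') :=
  List.map_congr_left (fun s _ => pvFirst_eq_headD s)

-- ===== VERDICT (by name: the statement is the Claim_ definition above) =====
theorem get_bilou_mention_offsets_spec : Claim_equal_get_bilou_mention_offsets := by
  intro labels _ hpre
  obtain ⟨-, hB⟩ := hpre
  show pvLoopA ((labels.map pvFirst) ++ ['O']) labels.length labels.length 0 []
      = pvLoopB (labels.map pvFirst) 0 none []
  rw [map_pvFirst_eq]
  have hlen : labels.length = (labels.map (fun s => s.toList.headD '?')).length := by simp
  rw [hlen]
  have hpre' : ∀ i, i < (labels.map (fun s => s.toList.headD '?')).length →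
      (labels.map (fun s => s.toList.headD '?')).getD i '?' = 'B' →
      ∃ j, j < (labels.map (fun s => s.toList.headD '?')).length ∧ i < j ∧
        (labels.map (fun s => s.toList.headD '?')).getD j '?' = 'L' ∧
        ∀ k, k < j → i < k →
          (labels.map (fun s => s.toList.headD '?')).getD k '?' = 'I' := by
    simpa using hB
  have key := pvLoopA_eq_pvLoopB (labels.map (fun s => s.toList.headD '?')) hpre'
    (labels.map (fun s => s.toList.headD '?')).length 0 [] (by omega)
  rw [List.drop_zero] at key
  exact key
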